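-- pv_equiv track=rewrite | github.com/daniel-reich/ubiquitous-fiesta | LhMkMu46rG8EweYf7_2.py | sort_by_letter
-- ===== SOURCE A (Python) =====
-- def sort_by_letter(lst):
--   if lst == []:
--     return []
--
--   letters = {}
--   result = []
--   for word in lst:
--     for letter in word:
--       if letter.isalpha():
--         letters[letter] = word
--
--   for key in sorted(list(letters.keys())):
--     result.append(letters[key])
--
--   return result
-- ===== SOURCE B (Python) =====
-- def sort_by_letter(lst):
--     letters = sorted({c for w in lst for c in w if c.isalpha()})
--     result = []
--     for letter in letters:
--         for word in reversed(lst):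
--             if letter in word:
--                 result.append(word)
--                 break
--     return result
-- ===== Notes on version B (the rewrite author's own statement) =====
-- stated objective: alternative
-- what changed: Replaces A's letter-to-word overwrite dictionary with an explicit sorted set of alphabetic characters plus, per letter, a reverse scan of the list for the last word containing it.
import Mathlib
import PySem

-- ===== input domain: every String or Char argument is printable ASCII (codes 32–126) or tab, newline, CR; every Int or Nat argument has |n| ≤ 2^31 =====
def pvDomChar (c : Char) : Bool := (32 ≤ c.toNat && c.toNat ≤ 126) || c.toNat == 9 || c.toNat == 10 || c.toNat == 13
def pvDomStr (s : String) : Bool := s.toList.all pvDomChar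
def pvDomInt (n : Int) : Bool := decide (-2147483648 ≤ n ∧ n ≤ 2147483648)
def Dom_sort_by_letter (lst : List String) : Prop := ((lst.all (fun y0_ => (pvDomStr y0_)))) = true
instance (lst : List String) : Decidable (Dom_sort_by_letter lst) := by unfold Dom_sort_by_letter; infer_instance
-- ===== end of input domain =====

-- B replaces A's letter-to-word overwrite dictionary by a sorted set of the alphabetic
-- characters plus one reverse scan per letter (alternative decomposition, same results).

-- ===== PORT A =====
-- letters[key] in A's output loop never raises (key comes from letters.keys), so it is
-- ported as getD with an arbitrary default.
def sort_by_letter (lst : List String) : List String :=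
  if lst = [] then []
  else
    let letters := lst.foldl (fun d word =>
      word.toList.foldl (fun d letter =>
        if PySem.Chars.isalpha letter then d.insert letter word else d) d)
      (PySem.Dict.empty (κ := Char) (ν := String))
    (PySem.List.sorted letters.keys (fun x => x) false).foldl
      (fun result key => result ++ [letters.getD key ""]) []

-- ===== PORT B =====
-- 'letter in word' for a single char is exactly list membership on the code points.
def sort_by_letter_alt (lst : List String) : List String :=
  let letters := PySem.List.sorted
    (PySem.Set.ofList (lst.flatMap (fun w => w.toList.filter (fun c => PySem.Chars.isalpha c))))
    (fun x => x) false
  letters.flatMap (fun letter =>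
    match lst.reverse.find? (fun w => w.toList.contains letter) with
    | some w => [w]
    | none => [])

-- ===== PRECONDITION & SPEC =====
def Spec_sort_by_letter (lst : List String) (out : List String) : Prop := out = sort_by_letter_alt lst
instance (lst : List String) (out : List String) : Decidable (Spec_sort_by_letter lst out) := by unfold Spec_sort_by_letter; infer_instance

-- ===== CLAIM (what is proved, stated in full; the proofs are below) =====
def Claim_equal_sort_by_letter : Prop := ∀ (lst : List String), Dom_sort_by_letter lst → Spec_sort_by_letter lst (sort_by_letter lst)

-- ===== LEMMAS AND PROOFS =====

-- the last word of lst that contains c (= what A's dict finally stores at key c)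
def lastWord (c : Char) : List String → Option String
  | [] => none
  | w :: t => (lastWord c t).or (if c ∈ w.toList then some w else none)

def alphas (lst : List String) : List Char :=
  lst.flatMap (fun w => w.toList.filter (fun c => PySem.Chars.isalpha c))

def innerF (word : String) (d : PySem.Dict Char String) : PySem.Dict Char String :=
  word.toList.foldl (fun d letter =>
    if PySem.Chars.isalpha letter then d.insert letter word else d) d

def outerF (lst : List String) (d : PySem.Dict Char String) : PySem.Dict Char String :=
  lst.foldl (fun d word => innerF word d) d

theorem get?_innerFoldCs (cs : List Char) (w : String) (d : PySem.Dict Char String) (c : Char)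
    (hc : PySem.Chars.isalpha c = true) :
    (cs.foldl (fun d letter => if PySem.Chars.isalpha letter then d.insert letter w else d) d).get? c
      = if c ∈ cs then some w else d.get? c := by
  induction cs generalizing d with
  | nil => simp
  | cons x t ih =>
    simp only [List.foldl_cons, ih]
    by_cases hct : c ∈ t
    · simp [hct]
    · by_cases hx : x = c
      · subst hx
        simp [hc, hct, PySem.Dict.get?_insert]
      · by_cases ha : PySem.Chars.isalpha x
        · simp [ha, hct, PySem.Dict.get?_insert]
        · simp [ha, hct]
          intro h
          exact absurd h.symm hx

theorem get?_innerF (w : String) (d : PySem.Dict Char String) (c : Char)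
    (hc : PySem.Chars.isalpha c = true) :
    (innerF w d).get? c = if c ∈ w.toList then some w else d.get? c :=
  get?_innerFoldCs w.toList w d c hc

theorem get?_outerF (lst : List String) (d : PySem.Dict Char String) (c : Char)
    (hc : PySem.Chars.isalpha c = true) :
    (outerF lst d).get? c = (lastWord c lst).or (d.get? c) := by
  induction lst generalizing d with
  | nil => simp [outerF, lastWord]
  | cons w t ih =>
    have : outerF (w :: t) d = outerF t (innerF w d) := rfl
    rw [this, ih, get?_innerF w d c hc]
    cases hl : lastWord c t <;> by_cases hw : c ∈ w.toList <;>
      simp [lastWord, hl, hw, Option.some_or, Option.none_or]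

theorem mem_keys_innerFoldCs (cs : List Char) (w : String) (d : PySem.Dict Char String) (c : Char) :
    c ∈ (cs.foldl (fun d letter => if PySem.Chars.isalpha letter then d.insert letter w else d) d).keys
      ↔ (c ∈ cs ∧ PySem.Chars.isalpha c = true) ∨ c ∈ d.keys := by
  induction cs generalizing d with
  | nil => simp
  | cons x t ih =>
    simp only [List.foldl_cons, ih, List.mem_cons]
    by_cases hx : c = x
    · subst hx
      by_cases ha : PySem.Chars.isalpha c <;>
        simp [ha, PySem.Dict.mem_keys_insert]
    · by_cases ha : PySem.Chars.isalpha x <;>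
        simp [ha, PySem.Dict.mem_keys_insert, hx]

theorem mem_keys_outerF (lst : List String) (d : PySem.Dict Char String) (c : Char) :
    c ∈ (outerF lst d).keys ↔ c ∈ alphas lst ∨ c ∈ d.keys := by
  induction lst generalizing d with
  | nil => simp [outerF, alphas]
  | cons w t ih =>
    have : outerF (w :: t) d = outerF t (innerF w d) := rfl
    rw [this, ih]
    simp only [innerF] at *
    rw [mem_keys_innerFoldCs]
    simp only [alphas, List.flatMap_cons, List.mem_append, List.mem_filter, List.mem_flatMap]
    rw [or_assoc]
    exact or_left_comm

theorem nodup_keys_innerFoldCs (cs : List Char) (w : String) (d : PySem.Dict Char String)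
    (h : d.keys.Nodup) :
    (cs.foldl (fun d letter => if PySem.Chars.isalpha letter then d.insert letter w else d) d).keys.Nodup := by
  induction cs generalizing d with
  | nil => simpa
  | cons x t ih =>
    simp only [List.foldl_cons]
    apply ih
    by_cases ha : PySem.Chars.isalpha x
    · simpa [ha] using PySem.Dict.nodup_keys_insert d x w h
    · simpa [ha]

theorem nodup_keys_outerF (lst : List String) (d : PySem.Dict Char String) (h : d.keys.Nodup) :
    (outerF lst d).keys.Nodup := by
  induction lst generalizing d with
  | nil => simpa [outerF]
  | cons w t ih =>
    have : outerF (w :: t) d = outerF t (innerF w d) := rfl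
    rw [this]
    exact ih _ (nodup_keys_innerFoldCs w.toList w d h)

theorem find?_reverse_eq_lastWord (lst : List String) (c : Char) :
    lst.reverse.find? (fun w => w.toList.contains c) = lastWord c lst := by
  induction lst with
  | nil => simp [lastWord]
  | cons w t ih =>
    simp only [List.reverse_cons, List.find?_append, ih, lastWord]
    cases hl : lastWord c t <;> by_cases hw : c ∈ w.toList <;>
      simp [hl, hw, List.find?, Option.some_or, Option.none_or]

theorem lastWord_isSome (lst : List String) (c : Char) (h : c ∈ alphas lst) :
    (lastWord c lst).isSome := by
  induction lst with
  | nil => simp [alphas] at h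
  | cons w t ih =>
    simp only [alphas, List.flatMap_cons, List.mem_append, List.mem_filter] at h
    rcases h with ⟨hmem, _⟩ | h
    · cases hl : lastWord c t <;> simp [lastWord, hl, hmem, Option.some_or, Option.none_or]
    · have := ih h
      cases hl : lastWord c t <;> simp [lastWord, hl, Option.some_or, Option.none_or] at this ⊢

theorem alpha_of_mem_alphas (lst : List String) (c : Char) (h : c ∈ alphas lst) :
    PySem.Chars.isalpha c = true := by
  simp only [alphas, List.mem_flatMap, List.mem_filter] at h
  exact h.choose_spec.2.2

theorem flatMap_singleton_eq_map {α β : Type} (l : List α) (f : α → List β) (g : α → β)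
    (h : ∀ x ∈ l, f x = [g x]) : l.flatMap f = l.map g := by
  induction l with
  | nil => simp
  | cons x t ih =>
    simp only [List.flatMap_cons, List.map_cons, h x (List.mem_cons_self),
      ih (fun y hy => h y (List.mem_cons_of_mem x hy))]
    rfl

-- ===== VERDICT (by name: the statement is the Claim_ definition above) =====
theorem sort_by_letter_spec : Claim_equal_sort_by_letter := by
  intro lst _
  unfold Spec_sort_by_letter sort_by_letter sort_by_letter_alt
  by_cases hnil : lst = []
  · subst hnil; rfl
  · simp only [hnil, if_false]
    have hkeys : ∀ c : Char, c ∈ (outerF lst PySem.Dict.empty).keys ↔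
        c ∈ PySem.Set.ofList (alphas lst) := by
      intro c
      rw [mem_keys_outerF, PySem.Set.mem_ofList]
      simp [PySem.Dict.keys_empty]
    have hperm : (outerF lst PySem.Dict.empty).keys.Perm (PySem.Set.ofList (alphas lst)) :=
      (List.perm_ext_iff_of_nodup
        (nodup_keys_outerF lst _ (by simp [PySem.Dict.keys_empty]))
        (PySem.Set.nodup_ofList _)).mpr hkeys
    have hsorted : PySem.List.sorted (outerF lst PySem.Dict.empty).keys (fun x => x) false
        = PySem.List.sorted (PySem.Set.ofList (alphas lst)) (fun x => x) false :=
      PySem.List.sorted_eq_sorted_of_perm _ _ _ (fun _ _ hab => hab) hperm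
    show (PySem.List.sorted (outerF lst PySem.Dict.empty).keys (fun x => x) false).foldl
        (fun result key => result ++ [(outerF lst PySem.Dict.empty).getD key ""]) []
      = (PySem.List.sorted (PySem.Set.ofList (alphas lst)) (fun x => x) false).flatMap
          (fun letter =>
            match lst.reverse.find? (fun w => w.toList.contains letter) with
            | some w => [w]
            | none => [])
    rw [hsorted, PySem.List.foldl_append_singleton_eq_map]
    refine (flatMap_singleton_eq_map _ _ _ ?_).symm
    intro c hc
    have hmemS : c ∈ alphas lst := by
      rw [PySem.List.mem_sorted] at hc
      exact (PySem.Set.mem_ofList _ _).mp hc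
    have hca := alpha_of_mem_alphas lst c hmemS
    obtain ⟨w₀, hw₀⟩ := Option.isSome_iff_exists.mp (lastWord_isSome lst c hmemS)
    have hfind : lst.reverse.find? (fun w => w.toList.contains c) = some w₀ := by
      rw [find?_reverse_eq_lastWord, hw₀]
    have hget : (outerF lst PySem.Dict.empty).getD c "" = w₀ := by
      rw [PySem.Dict.getD_eq_get?_getD, get?_outerF lst _ c hca, hw₀]
      rfl
    simp only [hfind, hget]
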